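-- pv_equiv track=rewrite | github.com/henrykmichalewski/formal-conjectures | FormalConjectures/Paper/SizeOrderConnectedDomination/Q3_counterexample.py | leaf_number
-- ===== SOURCE A (Python) =====
-- from itertools import combinations
--
-- def is_connected_set(adj, S):
--     S = set(S)
--     if not S:
--         return False
--     visited = {next(iter(S))}
--     stack = [next(iter(S))]
--     while stack:
--         v = stack.pop()
--         for w in adj[v]:
--             if w in S and w not in visited:
--                 visited.add(w)
--                 stack.append(w)
--     return visited == S
--
-- def leaf_number(vertices, edges, adj):
--     """Compute Ls = max leaves over all spanning trees."""
--     n = len(vertices)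
--     max_leaves = 0
--     best_tree = None
--     # Enumerate all subsets of n-1 edges, check if spanning tree
--     for tree_edges in combinations(edges, n - 1):
--         tree_adj = {v: set() for v in vertices}
--         for u, v in tree_edges:
--             tree_adj[u].add(v)
--             tree_adj[v].add(u)
--         if is_connected_set(tree_adj, set(vertices)):
--             leaves = sum(1 for v in vertices if len(tree_adj[v]) == 1)
--             if leaves > max_leaves:
--                 max_leaves = leaves
--                 best_tree = tree_edges
--     return max_leaves, best_tree
-- ===== SOURCE B (Python) =====
-- from itertools import combinations
--
-- def leaf_number(vertices, edges, adj):
--     """Compute Ls = max leaves over all spanning trees."""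
--     n = len(vertices)
--     max_leaves = 0
--     best_tree = None
--     # Enumerate subsets of n-1 edges; test connectivity by merging component
--     # labels edge by edge instead of running a DFS, and count leaves from
--     # per-vertex neighbour sets built directly from the chosen edges.
--     for tree_edges in combinations(edges, n - 1):
--         comp = {v: v for v in vertices}
--         for u, v in tree_edges:
--             cu, cv = comp[u], comp[v]
--             if cu != cv:
--                 for x in comp:
--                     if comp[x] == cv:
--                         comp[x] = cu
--         if len(set(comp.values())) == 1:
--             leaves = sum(
--                 1 for v in vertices
--                 if len({b if a == v else a
--                         for a, b in tree_edges if v == a or v == b}) == 1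
--             )
--             if leaves > max_leaves:
--                 max_leaves = leaves
--                 best_tree = tree_edges
--     return max_leaves, best_tree
-- ===== Notes on version B (the rewrite author's own statement) =====
-- stated objective: alternative
-- what changed: The per-subset connectivity test no longer builds a dict-of-sets adjacency and runs a stack-based DFS; instead B merges component labels edge by edge and accepts when one label class remains, and it counts leaves from per-vertex neighbour sets built directly from the chosen edges instead of the precomputed adjacency dict. Pre_ excludes exactly the inputs on which A raises: an empty vertex list (ValueError) and an edge with an endpoint outside vertices when a size-(n-1) subset is actually enumerated (KeyError).
import Mathlib
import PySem

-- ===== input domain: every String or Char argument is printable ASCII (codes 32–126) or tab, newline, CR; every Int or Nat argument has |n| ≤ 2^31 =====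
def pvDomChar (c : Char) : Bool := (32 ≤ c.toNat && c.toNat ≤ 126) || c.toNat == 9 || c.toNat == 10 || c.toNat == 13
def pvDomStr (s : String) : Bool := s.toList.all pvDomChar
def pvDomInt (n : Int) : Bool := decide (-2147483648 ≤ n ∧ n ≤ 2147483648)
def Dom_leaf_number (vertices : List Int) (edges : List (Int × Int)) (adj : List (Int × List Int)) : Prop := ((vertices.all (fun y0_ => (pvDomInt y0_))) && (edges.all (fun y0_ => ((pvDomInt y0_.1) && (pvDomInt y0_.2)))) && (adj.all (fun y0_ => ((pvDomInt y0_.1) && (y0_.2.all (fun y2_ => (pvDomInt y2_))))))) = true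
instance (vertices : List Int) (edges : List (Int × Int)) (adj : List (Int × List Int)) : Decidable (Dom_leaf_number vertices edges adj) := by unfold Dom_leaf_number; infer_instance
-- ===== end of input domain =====

-- B replaces A's per-subset DFS connectivity test by component-label merging and counts each
-- vertex's neighbours with a per-vertex set built straight from the chosen edges
-- (objective: alternative algorithm, similar cost).

-- ===== PORT A =====
-- itertools.combinations is PySem.List.combinations (both Pythons import it).

-- 'tree_adj = {v: set() for v in vertices}' then 'for u, v in tree_edges: tree_adj[u].add(v); tree_adj[v].add(u)'.
-- Python raises KeyError on an endpoint that is not a key; under Pre_ every endpoint of an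
-- enumerated edge is a vertex (hence a key), where Dict.modify with default ∅ is exact.
def buildAdj (vertices : List Int) (t : List (Int × Int)) : PySem.Dict Int (PySem.Set Int) :=
  t.foldl
    (fun d e =>
      (d.modify e.1 PySem.Set.empty (fun s => s.add e.2)).modify e.2 PySem.Set.empty (fun s => s.add e.1))
    (vertices.foldl (fun d v => d.insert v PySem.Set.empty) PySem.Dict.empty)

-- body of the inner 'for w in adj[v]: if w in S and w not in visited: visited.add(w); stack.append(w)';
-- the freshly pushed elements are collected in p.2 (most recently pushed first).
def dfsScan (S : PySem.Set Int) (p : PySem.Set Int × List Int) (w : Int) : PySem.Set Int × List Int :=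
  if S.contains w && !(p.1.contains w) then (p.1.add w, w :: p.2) else p

-- strict countP monotonicity, used only for the termination of dfsLoop
theorem countP_lt_of_witness {α : Type} (l : List α) (a : α) (q p : α → Bool)
    (ha : a ∈ l) (h : ∀ x, q x = true → p x = true) (hqa : q a = false) (hpa : p a = true) :
    l.countP q < l.countP p := by
  induction l with
  | nil => cases ha
  | cons b l ih =>
    have hmono : l.countP q ≤ l.countP p := List.countP_mono_left (fun x _ hx => h x hx)
    rcases List.mem_cons.1 ha with rfl | hb
    · simp [List.countP_cons, hqa, hpa]
      omega
    · have hlt := ih hb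
      by_cases hq : q b = true
      · have hp := h b hq
        simp [List.countP_cons, hq, hp]
        omega
      · simp only [Bool.not_eq_true] at hq
        simp only [List.countP_cons, hq]
        rcases hp : p b <;> simp <;> omega

-- number of elements of S not yet visited (termination measure for the DFS)
def unvis (S visited : PySem.Set Int) : Nat := List.countP (fun x => !(visited.contains x)) S

theorem dfsScan_measure (S : PySem.Set Int) (l : List Int) (p : PySem.Set Int × List Int) :
    unvis S (l.foldl (dfsScan S) p).1 + (l.foldl (dfsScan S) p).2.length ≤
      unvis S p.1 + p.2.length := by
  induction l generalizing p with
  | nil => simp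
  | cons w l ih =>
    simp only [List.foldl_cons]
    refine le_trans (ih (dfsScan S p w)) ?_
    unfold dfsScan
    split
    · rename_i hcond
      simp only [Bool.and_eq_true, Bool.not_eq_true'] at hcond
      have hw : w ∈ S := (PySem.Set.contains_iff S w).1 hcond.1
      have mono : ∀ x, p.1.contains x = true → (p.1.add w).contains x = true := fun x hx =>
        (PySem.Set.contains_iff _ x).2 ((PySem.Set.mem_add p.1 w x).2
          (Or.inl ((PySem.Set.contains_iff _ x).1 hx)))
      have hlt : unvis S (p.1.add w) < unvis S p.1 := by
        apply countP_lt_of_witness S w _ _ hw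
        · intro x hx
          simp only [Bool.not_eq_true'] at hx ⊢
          cases hpx : PySem.Set.contains p.1 x
          · rfl
          · exact absurd (mono x hpx) (by intro hc; rw [hc] at hx; cases hx)
        · have hcw : (p.1.add w).contains w = true :=
            (PySem.Set.contains_iff _ w).2 ((PySem.Set.mem_add p.1 w w).2 (Or.inr rfl))
          simp [hcw]
        · simp only [Bool.not_eq_true']
          exact hcond.2
      simp only [List.length_cons]
      omega
    · exact le_rfl

-- the 'while stack:' loop of is_connected_set; the stack top is the list head
-- (Python pushes/pops at the right end; mirrored, the same vertices are popped in the same order)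
def dfsLoop (adj : PySem.Dict Int (PySem.Set Int)) (S : PySem.Set Int) :
    PySem.Set Int → List Int → PySem.Set Int
  | visited, [] => visited
  | visited, v :: stack =>
      let st := (adj.getD v PySem.Set.empty).foldl (dfsScan S) (visited, [])
      dfsLoop adj S st.1 (st.2 ++ stack)
termination_by visited stack => unvis S visited + stack.length
decreasing_by
  have h := dfsScan_measure S (adj.getD v PySem.Set.empty) (visited, [])
  simp only [List.length_nil, Nat.add_zero, List.length_append, List.length_cons] at h ⊢
  omega

-- is_connected_set(adj, S); the returned Bool does not depend on which element of S
-- next(iter(S)) yields, so the port starts from the first element of the Set's list.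
def is_connected_set (adj : PySem.Dict Int (PySem.Set Int)) (S0 : List Int) : Bool :=
  match PySem.Set.ofList S0 with          -- S = set(S)
  | [] => false                           -- 'if not S: return False'
  | v0 :: rest =>
      PySem.Set.equal
        (dfsLoop adj (v0 :: rest) (PySem.Set.add PySem.Set.empty v0) [v0]) (v0 :: rest)

def leaf_number (vertices : List Int) (edges : List (Int × Int)) (adj : List (Int × List Int)) : Int × (Option (List (Int × Int))) :=
  let n : Int := vertices.length
  -- combinations(edges, n - 1): Python raises ValueError when n = 0 (excluded by Pre_)
  (PySem.List.combinations edges (n - 1).toNat).foldl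
    (fun st t =>
      let tree_adj := buildAdj vertices t
      if is_connected_set tree_adj vertices then
        let leaves : Int :=
          (vertices.map (fun v =>
            if PySem.Set.len (tree_adj.getD v PySem.Set.empty) == (1 : Int) then (1 : Int) else 0)).sum
        if leaves > st.1 then (leaves, some t) else st
      else st)
    ((0 : Int), (none : Option (List (Int × Int))))

-- ===== PORT B =====

-- comp = {v: v for v in vertices}
def comp0 (vertices : List Int) : PySem.Dict Int Int :=
  vertices.foldl (fun d v => d.insert v v) PySem.Dict.empty

-- one edge of B's merging loop: cu, cv = comp[u], comp[v]; if cu != cv relabel cv to cu.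
-- A KeyError is impossible under Pre_ (every endpoint of an enumerated edge is a key),
-- where getD with default 0 is exact.
def mergeStep (d : PySem.Dict Int Int) (e : Int × Int) : PySem.Dict Int Int :=
  let cu := d.getD e.1 0
  let cv := d.getD e.2 0
  if cu == cv then d
  else PySem.Dict.mk (d.items.map (fun kv => (kv.1, if kv.2 == cv then cu else kv.2)))

-- {b if a == v else a for a, b in tree_edges if v == a or v == b}
def nbrSet (t : List (Int × Int)) (v : Int) : PySem.Set Int :=
  t.foldl
    (fun s e => if v == e.1 || v == e.2 then s.add (if v == e.1 then e.2 else e.1) else s)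
    PySem.Set.empty

def leaf_number_alt (vertices : List Int) (edges : List (Int × Int)) (adj : List (Int × List Int)) : Int × (Option (List (Int × Int))) :=
  let n : Int := vertices.length
  (PySem.List.combinations edges (n - 1).toNat).foldl
    (fun st t =>
      let comp := t.foldl mergeStep (comp0 vertices)
      if PySem.Set.len (PySem.Set.ofList comp.values) == (1 : Int) then
        let leaves : Int :=
          (vertices.map (fun v => if PySem.Set.len (nbrSet t v) == (1 : Int) then (1 : Int) else 0)).sum
        if leaves > st.1 then (leaves, some t) else st
      else st)
    ((0 : Int), (none : Option (List (Int × Int))))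

-- ===== PRECONDITION & SPEC =====
-- Pre_ excludes exactly the inputs on which A raises: an empty vertex list (combinations(edges, -1)
-- raises ValueError) and an edge list with an endpoint outside vertices when some size-(n-1)
-- subset is actually enumerated, i.e. when n ≥ 2 and len(edges) ≥ n-1 (A then raises KeyError);
-- no input on which A returns a value is excluded.
def Pre_leaf_number (vertices : List Int) (edges : List (Int × Int)) (adj : List (Int × List Int)) : Prop :=
  vertices ≠ [] ∧
    (vertices.length = 1 ∨ edges.length + 1 < vertices.length ∨
      ∀ e ∈ edges, e.1 ∈ vertices ∧ e.2 ∈ vertices)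
instance (vertices : List Int) (edges : List (Int × Int)) (adj : List (Int × List Int)) : Decidable (Pre_leaf_number vertices edges adj) := by unfold Pre_leaf_number; infer_instance

def pvWitness_leaf_number : List Int × (List (Int × Int)) × (List (Int × List Int)) :=
  ([1, 2, 3], [(1, 2), (2, 3), (1, 3)], [])

def Spec_leaf_number (vertices : List Int) (edges : List (Int × Int)) (adj : List (Int × List Int)) (out : Int × (Option (List (Int × Int)))) : Prop := out = leaf_number_alt vertices edges adj
instance (vertices : List Int) (edges : List (Int × Int)) (adj : List (Int × List Int)) (out : Int × (Option (List (Int × Int)))) : Decidable (Spec_leaf_number vertices edges adj out) := by unfold Spec_leaf_number; infer_instance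

-- ===== CLAIM (what is proved, stated in full; the proofs are below) =====
def Claim_equal_leaf_number : Prop := ∀ (vertices : List Int) (edges : List (Int × Int)) (adj : List (Int × List Int)), Dom_leaf_number vertices edges adj → Pre_leaf_number vertices edges adj → Spec_leaf_number vertices edges adj (leaf_number vertices edges adj)

-- ===== LEMMAS AND PROOFS =====

-- connectivity in the undirected graph given by the edge list t
def edgeRel (t : List (Int × Int)) (a b : Int) : Prop := (a, b) ∈ t ∨ (b, a) ∈ t

def Conn (t : List (Int × Int)) (a b : Int) : Prop := Relation.ReflTransGen (edgeRel t) a b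

theorem edgeRel_symm {t : List (Int × Int)} {a b : Int} (h : edgeRel t a b) : edgeRel t b a :=
  h.symm

theorem conn_refl (t : List (Int × Int)) (a : Int) : Conn t a a := Relation.ReflTransGen.refl

theorem conn_symm {t : List (Int × Int)} {a b : Int} (h : Conn t a b) : Conn t b a := by
  induction h with
  | refl => exact Relation.ReflTransGen.refl
  | tail _ hstep ih =>
      exact Relation.ReflTransGen.trans (Relation.ReflTransGen.single (edgeRel_symm hstep)) ih

theorem conn_trans {t : List (Int × Int)} {a b c : Int} (h₁ : Conn t a b) (h₂ : Conn t b c) :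
    Conn t a c := Relation.ReflTransGen.trans h₁ h₂

theorem conn_nil {a b : Int} : Conn [] a b ↔ a = b := by
  constructor
  · intro h
    induction h with
    | refl => rfl
    | tail _ hstep ih => rcases hstep with h | h <;> cases h
  · rintro rfl; exact conn_refl _ _

theorem conn_mono {t t' : List (Int × Int)} (hsub : ∀ e ∈ t, e ∈ t') {a b : Int}
    (h : Conn t a b) : Conn t' a b := by
  induction h with
  | refl => exact conn_refl _ _
  | tail _ hstep ih =>
      exact Relation.ReflTransGen.tail ih
        (by rcases hstep with h | h; exact Or.inl (hsub _ h); exact Or.inr (hsub _ h))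

theorem conn_append_iff {t : List (Int × Int)} {e : Int × Int} {x y : Int} :
    Conn (t ++ [e]) x y ↔
      Conn t x y ∨ (Conn t x e.1 ∧ Conn t e.2 y) ∨ (Conn t x e.2 ∧ Conn t e.1 y) := by
  constructor
  · intro h
    induction h with
    | refl => exact Or.inl (conn_refl _ _)
    | @tail b c hab hstep ih =>
        rcases hstep with hm | hm
        · rcases List.mem_append.1 hm with hm | hm
          · rcases ih with h1 | ⟨h1, h2⟩ | ⟨h1, h2⟩
            · exact Or.inl (Relation.ReflTransGen.tail h1 (Or.inl hm))
            · exact Or.inr (Or.inl ⟨h1, Relation.ReflTransGen.tail h2 (Or.inl hm)⟩)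
            · exact Or.inr (Or.inr ⟨h1, Relation.ReflTransGen.tail h2 (Or.inl hm)⟩)
          · obtain ⟨hb, hc⟩ := Prod.ext_iff.1 (List.mem_singleton.1 hm)
            subst hb; subst hc
            rcases ih with h1 | ⟨h1, h2⟩ | ⟨h1, h2⟩
            · exact Or.inr (Or.inl ⟨h1, conn_refl _ _⟩)
            · exact Or.inr (Or.inl ⟨h1, conn_refl _ _⟩)
            · exact Or.inl h1
        · rcases List.mem_append.1 hm with hm | hm
          · rcases ih with h1 | ⟨h1, h2⟩ | ⟨h1, h2⟩
            · exact Or.inl (Relation.ReflTransGen.tail h1 (Or.inr hm))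
            · exact Or.inr (Or.inl ⟨h1, Relation.ReflTransGen.tail h2 (Or.inr hm)⟩)
            · exact Or.inr (Or.inr ⟨h1, Relation.ReflTransGen.tail h2 (Or.inr hm)⟩)
          · obtain ⟨hc, hb⟩ := Prod.ext_iff.1 (List.mem_singleton.1 hm)
            subst hb; subst hc
            rcases ih with h1 | ⟨h1, h2⟩ | ⟨h1, h2⟩
            · exact Or.inr (Or.inr ⟨h1, conn_refl _ _⟩)
            · exact Or.inl h1
            · exact Or.inl (conn_trans h1 (conn_symm h2))
  · have hsub : ∀ e' ∈ t, e' ∈ t ++ [e] := fun e' h => List.mem_append.2 (Or.inl h)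
    have he1 : Conn (t ++ [e]) e.1 e.2 :=
      Relation.ReflTransGen.single (Or.inl (by simp))
    rintro (h | ⟨h1, h2⟩ | ⟨h1, h2⟩)
    · exact conn_mono hsub h
    · exact conn_trans (conn_mono hsub h1) (conn_trans he1 (conn_mono hsub h2))
    · exact conn_trans (conn_mono hsub h1) (conn_trans (conn_symm he1) (conn_mono hsub h2))

-- ---- A-side: the adjacency dict ----

theorem getD_buildAdj_init (vertices : List Int) (v : Int) :
    (vertices.foldl (fun d w => d.insert w PySem.Set.empty) (PySem.Dict.empty : PySem.Dict Int (PySem.Set Int))).getD v PySem.Set.empty = PySem.Set.empty := by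
  suffices h : ∀ (V : List Int) (d : PySem.Dict Int (PySem.Set Int)),
      (∀ u, d.getD u PySem.Set.empty = PySem.Set.empty) →
      ∀ u, (V.foldl (fun d w => d.insert w PySem.Set.empty) d).getD u PySem.Set.empty = PySem.Set.empty by
    exact h vertices _ (fun u => PySem.Dict.getD_empty u _) v
  intro V
  induction V with
  | nil => intro d hd u; simpa using hd u
  | cons w V ih =>
      intro d hd u
      simp only [List.foldl_cons]
      refine ih _ (fun u' => ?_) u
      rw [PySem.Dict.getD_insert]
      split
      · rfl
      · exact hd u'

theorem edgeRel_append_singleton (t : List (Int × Int)) (e : Int × Int) (v w : Int) :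
    edgeRel (t ++ [e]) v w ↔ edgeRel t v w ∨ (v = e.1 ∧ w = e.2) ∨ (v = e.2 ∧ w = e.1) := by
  simp only [edgeRel, List.mem_append, List.mem_singleton, Prod.ext_iff]
  tauto

theorem buildAdj_append (vertices : List Int) (t : List (Int × Int)) (e : Int × Int) :
    buildAdj vertices (t ++ [e]) =
      ((buildAdj vertices t).modify e.1 PySem.Set.empty (fun s => s.add e.2)).modify e.2
        PySem.Set.empty (fun s => s.add e.1) := by
  simp [buildAdj, List.foldl_append]

theorem mem_getD_buildAdj (vertices : List Int) (t : List (Int × Int)) (v w : Int) :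
    w ∈ (buildAdj vertices t).getD v PySem.Set.empty ↔ edgeRel t v w := by
  induction t using List.reverseRecOn generalizing v w with
  | nil =>
      simp only [buildAdj, List.foldl_nil, getD_buildAdj_init]
      simp [edgeRel, PySem.Set.empty]
  | append_singleton t e ih =>
      rw [buildAdj_append, edgeRel_append_singleton, PySem.Dict.getD_modify]
      split_ifs with h2
      · subst h2
        rw [PySem.Set.mem_add, PySem.Dict.getD_modify]
        split_ifs with h12
        · rw [h12, PySem.Set.mem_add, ih]
          tauto
        · rw [ih]
          tauto
      · rw [PySem.Dict.getD_modify]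
        split_ifs with h1
        · subst h1
          rw [PySem.Set.mem_add, ih]
          tauto
        · rw [ih]
          simp [h1, h2]

theorem nodup_getD_buildAdj (vertices : List Int) (t : List (Int × Int)) (v : Int) :
    ((buildAdj vertices t).getD v PySem.Set.empty).Nodup := by
  induction t using List.reverseRecOn generalizing v with
  | nil =>
      simp only [buildAdj, List.foldl_nil, getD_buildAdj_init]
      exact List.nodup_nil
  | append_singleton t e ih =>
      rw [buildAdj_append, PySem.Dict.getD_modify]
      split_ifs with h2
      · apply PySem.Set.nodup_add
        rw [PySem.Dict.getD_modify]
        split_ifs with h12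
        · exact PySem.Set.nodup_add _ _ (ih _)
        · exact ih _
      · rw [PySem.Dict.getD_modify]
        split_ifs with h1
        · exact PySem.Set.nodup_add _ _ (ih _)
        · exact ih _

-- ---- A-side: the DFS ----

theorem scanFold_mem (S : PySem.Set Int) (l : List Int) (p : PySem.Set Int × List Int) (x : Int) :
    (x ∈ (l.foldl (dfsScan S) p).1 ↔ x ∈ p.1 ∨ (x ∈ l ∧ S.contains x = true)) ∧
    (x ∈ (l.foldl (dfsScan S) p).2 ↔ x ∈ p.2 ∨ (x ∈ l ∧ S.contains x = true ∧ x ∉ p.1)) := by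
  induction l generalizing p with
  | nil => simp
  | cons w l ih =>
    simp only [List.foldl_cons]
    by_cases hS : S.contains w = true
    · by_cases hv : p.1.contains w = true
      · have hd : dfsScan S p w = p := by unfold dfsScan; rw [hv]; simp
        rw [hd]
        obtain ⟨ih1, ih2⟩ := ih p
        have hw : w ∈ p.1 := (PySem.Set.contains_iff _ _).1 hv
        constructor
        · refine ih1.trans ?_
          by_cases hxw : x = w
          · subst hxw; simp [hw, hS, (PySem.Set.contains_iff S x).1 hS]
          · simp [List.mem_cons, hxw]
        · refine ih2.trans ?_
          by_cases hxw : x = w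
          · subst hxw; simp [hw, hS, (PySem.Set.contains_iff S x).1 hS]
          · simp [List.mem_cons, hxw]
      · have hv' : p.1.contains w = false := by
          cases h : p.1.contains w
          · rfl
          · exact absurd h hv
        have hnv : w ∉ p.1 := fun hm => hv ((PySem.Set.contains_iff _ _).2 hm)
        have hd : dfsScan S p w = (p.1.add w, w :: p.2) := by unfold dfsScan; rw [hS, hv']; simp
        rw [hd]
        obtain ⟨ih1, ih2⟩ := ih (p.1.add w, w :: p.2)
        simp only [PySem.Set.mem_add, List.mem_cons] at ih1 ih2
        constructor
        · refine ih1.trans ?_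
          by_cases hxw : x = w
          · subst hxw; simp [hS, hnv, (PySem.Set.contains_iff S x).1 hS]
          · simp [List.mem_cons, hxw]
        · refine ih2.trans ?_
          by_cases hxw : x = w
          · subst hxw; simp [hS, hnv, (PySem.Set.contains_iff S x).1 hS]
          · simp [List.mem_cons, hxw, PySem.Set.mem_add]
    · have hS' : S.contains w = false := by
        cases h : S.contains w
        · rfl
        · exact absurd h hS
      have hd : dfsScan S p w = p := by unfold dfsScan; rw [hS']; simp
      rw [hd]
      obtain ⟨ih1, ih2⟩ := ih p
      constructor
      · refine ih1.trans ?_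
        by_cases hxw : x = w
        · subst hxw
          have hns : x ∉ S := fun hm => hS ((PySem.Set.contains_iff S x).2 hm)
          simp [hS, hns]
        · simp [List.mem_cons, hxw]
      · refine ih2.trans ?_
        by_cases hxw : x = w
        · subst hxw
          have hns : x ∉ S := fun hm => hS ((PySem.Set.contains_iff S x).2 hm)
          simp [hS, hns]
        · simp [List.mem_cons, hxw]

theorem dfsLoop_spec (adj : PySem.Dict Int (PySem.Set Int)) (S : PySem.Set Int) (v0 : Int)
    (HS : ∀ v w : Int, w ∈ adj.getD v PySem.Set.empty → S.contains w = true)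
    (visited : PySem.Set Int) (stack : List Int)
    (h1 : ∀ x ∈ stack, x ∈ visited)
    (h2 : ∀ x ∈ visited, Relation.ReflTransGen (fun a b => b ∈ adj.getD a PySem.Set.empty) v0 x)
    (h3 : ∀ x ∈ visited, x ∉ stack → ∀ w ∈ adj.getD x PySem.Set.empty, w ∈ visited) :
    (∀ x ∈ visited, x ∈ dfsLoop adj S visited stack) ∧
    (∀ x ∈ dfsLoop adj S visited stack, ∀ w ∈ adj.getD x PySem.Set.empty,
        w ∈ dfsLoop adj S visited stack) ∧
    (∀ x ∈ dfsLoop adj S visited stack,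
        Relation.ReflTransGen (fun a b => b ∈ adj.getD a PySem.Set.empty) v0 x) := by
  revert h1 h2 h3
  induction visited, stack using dfsLoop.induct adj S with
  | case1 visited =>
      intro h1 h2 h3
      rw [dfsLoop]
      exact ⟨fun x hx => hx, fun x hx w hw => h3 x hx (by simp) w hw, h2⟩
  | case2 visited v stack st ih =>
      intro h1 h2 h3
      rw [dfsLoop]
      have hmem1 : ∀ x : Int, x ∈ st.1 ↔ x ∈ visited ∨
          (x ∈ adj.getD v PySem.Set.empty ∧ S.contains x = true) := by
        intro x
        have := (scanFold_mem S (adj.getD v PySem.Set.empty) (visited, []) x).1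
        simpa using this
      have hmem2 : ∀ x : Int, x ∈ st.2 ↔
          (x ∈ adj.getD v PySem.Set.empty ∧ S.contains x = true ∧ x ∉ visited) := by
        intro x
        have := (scanFold_mem S (adj.getD v PySem.Set.empty) (visited, []) x).2
        simpa using this
      have hv : v ∈ visited := h1 v List.mem_cons_self
      have h1' : ∀ x ∈ st.2 ++ stack, x ∈ st.1 := by
        intro x hx
        rcases List.mem_append.1 hx with hx | hx
        · rcases (hmem2 x).1 hx with ⟨ha, hb, _⟩
          exact (hmem1 x).2 (Or.inr ⟨ha, hb⟩)
        · exact (hmem1 x).2 (Or.inl (h1 x (List.mem_cons_of_mem _ hx)))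
      have h2' : ∀ x ∈ st.1,
          Relation.ReflTransGen (fun a b => b ∈ adj.getD a PySem.Set.empty) v0 x := by
        intro x hx
        rcases (hmem1 x).1 hx with hx | ⟨ha, _⟩
        · exact h2 x hx
        · exact Relation.ReflTransGen.tail (h2 v hv) ha
      have h3' : ∀ x ∈ st.1, x ∉ st.2 ++ stack →
          ∀ w ∈ adj.getD x PySem.Set.empty, w ∈ st.1 := by
        intro x hx hns w hw
        by_cases hxv : x ∈ visited
        · by_cases hxveq : x = v
          · subst hxveq
            exact (hmem1 w).2 (Or.inr ⟨hw, HS x w hw⟩)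
          · have hxs : x ∉ stack := fun hm => hns (List.mem_append.2 (Or.inr hm))
            have : x ∉ v :: stack := by
              intro hm
              rcases List.mem_cons.1 hm with hm | hm
              · exact hxveq hm
              · exact hxs hm
            exact (hmem1 w).2 (Or.inl (h3 x hxv this w hw))
        · rcases (hmem1 x).1 hx with hx' | ⟨ha, hb⟩
          · exact absurd hx' hxv
          · exact absurd (List.mem_append.2 (Or.inl ((hmem2 x).2 ⟨ha, hb, hxv⟩))) hns
      obtain ⟨c1, c2, c3⟩ := ih h1' h2' h3'
      exact ⟨fun x hx => c1 x ((hmem1 x).2 (Or.inl hx)), c2, c3⟩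

-- foldl of Set.add only appends to the accumulator
theorem foldl_add_prefix (l : List Int) (s : PySem.Set Int) :
    ∃ r, l.foldl PySem.Set.add s = s ++ r := by
  induction l generalizing s with
  | nil => exact ⟨[], by simp⟩
  | cons w l ih =>
      simp only [List.foldl_cons]
      by_cases h : PySem.Set.contains s w = true
      · have hadd : PySem.Set.add s w = s := by
          simp [PySem.Set.add, (PySem.Set.contains_iff s w).1 h]
        rw [hadd]
        exact ih s
      · have hw : w ∉ s := fun hw => h ((PySem.Set.contains_iff s w).2 hw)
        have hadd : PySem.Set.add s w = s ++ [w] := by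
          simp [PySem.Set.add, hw]
        rw [hadd]
        obtain ⟨r, hr⟩ := ih (s ++ [w])
        exact ⟨w :: r, by simpa using hr⟩

theorem ofList_cons_head (v0 : Int) (V' : List Int) :
    ∃ W', PySem.Set.ofList (v0 :: V') = v0 :: W' := by
  rw [PySem.Set.ofList_eq_foldl]
  simp only [List.foldl_cons]
  have hadd : PySem.Set.add ([] : PySem.Set Int) v0 = [v0] := by
    unfold PySem.Set.add
    simp [PySem.Set.contains]
  rw [hadd]
  obtain ⟨r, hr⟩ := foldl_add_prefix V' [v0]
  exact ⟨r, by simpa using hr⟩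

-- acceptance of a subset by A, in terms of connectivity from the first vertex
theorem accA_iff (v0 : Int) (V' : List Int) (t : List (Int × Int))
    (hE : ∀ e ∈ t, e.1 ∈ (v0 :: V') ∧ e.2 ∈ (v0 :: V')) :
    is_connected_set (buildAdj (v0 :: V') t) (v0 :: V') = true ↔
      ∀ x ∈ (v0 :: V'), Conn t v0 x := by
  obtain ⟨W', hW⟩ := ofList_cons_head v0 V'
  have hmemW : ∀ x : Int, x ∈ (v0 :: W') ↔ x ∈ (v0 :: V') := by
    intro x
    rw [← hW]
    exact PySem.Set.mem_ofList _ x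
  unfold is_connected_set
  rw [hW]
  have hrel : ∀ a b : Int,
      b ∈ (buildAdj (v0 :: V') t).getD a PySem.Set.empty ↔ edgeRel t a b :=
    fun a b => mem_getD_buildAdj (v0 :: V') t a b
  have HS : ∀ v w : Int, w ∈ (buildAdj (v0 :: V') t).getD v PySem.Set.empty →
      PySem.Set.contains (v0 :: W') w = true := by
    intro v w hw
    rcases (hrel v w).1 hw with hm | hm
    · exact (PySem.Set.contains_iff _ _).2 ((hmemW _).2 (hE _ hm).2)
    · exact (PySem.Set.contains_iff _ _).2 ((hmemW _).2 (hE _ hm).1)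
  have hv0 : v0 ∈ PySem.Set.add PySem.Set.empty v0 :=
    (PySem.Set.mem_add _ _ _).2 (Or.inr rfl)
  have hvis : ∀ x, x ∈ PySem.Set.add (PySem.Set.empty : PySem.Set Int) v0 ↔ x = v0 := by
    intro x
    rw [PySem.Set.mem_add]
    simp [PySem.Set.empty]
  obtain ⟨c1, c2, c3⟩ := dfsLoop_spec (buildAdj (v0 :: V') t) (v0 :: W') v0 HS
    (PySem.Set.add PySem.Set.empty v0) [v0]
    (by intro x hx; rcases List.mem_singleton.1 hx with rfl; exact hv0)
    (by intro x hx; rcases (hvis x).1 hx with rfl; exact Relation.ReflTransGen.refl)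
    (by intro x hx hns; exact absurd (List.mem_singleton.2 ((hvis x).1 hx)) hns)
  have hreach : ∀ x, Relation.ReflTransGen
      (fun a b => b ∈ (buildAdj (v0 :: V') t).getD a PySem.Set.empty) v0 x → Conn t v0 x :=
    fun x h => Relation.ReflTransGen.mono (fun a b hab => (hrel a b).1 hab) h
  have hRS : ∀ x, Relation.ReflTransGen
      (fun a b => b ∈ (buildAdj (v0 :: V') t).getD a PySem.Set.empty) v0 x → x ∈ (v0 :: W') := by
    intro x h
    induction h with
    | refl => exact List.mem_cons_self
    | tail _ hstep _ => exact (PySem.Set.contains_iff _ _).1 (HS _ _ hstep)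
  have hconnR : ∀ x, Conn t v0 x →
      x ∈ dfsLoop (buildAdj (v0 :: V') t) (v0 :: W') (PySem.Set.add PySem.Set.empty v0) [v0] := by
    intro x h
    induction h with
    | refl => exact c1 v0 hv0
    | tail _ hstep ih => exact c2 _ ih _ ((hrel _ _).2 hstep)
  constructor
  · intro heq x hx
    have := (PySem.Set.equal_iff _ _).1 heq
    exact hreach x (c3 x ((this x).2 ((hmemW x).2 hx)))
  · intro hc
    refine (PySem.Set.equal_iff _ _).2 (fun x => ⟨fun hx => hRS x (c3 x hx), fun hx => hconnR x (hc x ((hmemW x).1 hx))⟩)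

-- ---- B-side: the label dict ----

theorem get?_mapVal {ν : Type} (l : List (Int × ν)) (f : ν → ν) (x : Int) :
    (PySem.Dict.mk (l.map (fun kv => (kv.1, f kv.2)))).get? x =
      ((PySem.Dict.mk l).get? x).map f := by
  induction l with
  | nil => simp [PySem.Dict.get?]
  | cons kv l ih =>
      simp only [List.map_cons]
      rw [PySem.Dict.get?_mk_cons, PySem.Dict.get?_mk_cons]
      by_cases h : kv.1 == x
      · simp [h]
      · simp only [h]
        simpa using ih

theorem getD_foldl_insert_self (V : List Int) (d : PySem.Dict Int Int) (x : Int) :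
    (V.foldl (fun d v => d.insert v v) d).getD x 0 = if x ∈ V then x else d.getD x 0 := by
  induction V generalizing d with
  | nil => simp
  | cons w V ih =>
      simp only [List.foldl_cons]
      rw [ih]
      by_cases hv : x ∈ V
      · simp [hv, List.mem_cons]
      · rw [PySem.Dict.getD_insert]
        by_cases hw : x = w
        · simp [hw, hv, List.mem_cons]
        · simp [hw, hv, List.mem_cons]

theorem getD_comp0 (vertices : List Int) (x : Int) (hx : x ∈ vertices) :
    (comp0 vertices).getD x 0 = x := by
  unfold comp0
  rw [getD_foldl_insert_self]
  simp [hx]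

theorem keys_comp0 (vertices : List Int) :
    (comp0 vertices).keys = PySem.Set.ofList vertices := by
  unfold comp0
  rw [PySem.Dict.keys_foldl_insert vertices (fun _ x => x)]
  rw [PySem.Set.ofList_eq_foldl]
  simp [PySem.Set.update, PySem.Dict.keys_empty]

theorem keys_relabel {ν : Type} (d : PySem.Dict Int ν) (f : ν → ν) :
    (PySem.Dict.mk (d.items.map (fun kv => (kv.1, f kv.2)))).keys = d.keys := by
  simp [PySem.Dict.keys, List.map_map, Function.comp_def]

theorem keys_mergeStep (d : PySem.Dict Int Int) (e : Int × Int) :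
    (mergeStep d e).keys = d.keys := by
  by_cases h : (d.getD e.1 0 == d.getD e.2 0) = true
  · simp [mergeStep, h]
  · have hstep : mergeStep d e = PySem.Dict.mk (d.items.map
        (fun kv => (kv.1, if kv.2 == d.getD e.2 0 then d.getD e.1 0 else kv.2))) := by
      simp only [Bool.not_eq_true] at h
      simp [mergeStep, h]
    rw [hstep]
    exact keys_relabel d (fun c => if c == d.getD e.2 0 then d.getD e.1 0 else c)

theorem keys_mergeRun (vertices : List Int) (t : List (Int × Int)) :
    (t.foldl mergeStep (comp0 vertices)).keys = PySem.Set.ofList vertices := by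
  suffices h : ∀ (t : List (Int × Int)) (d : PySem.Dict Int Int),
      (t.foldl mergeStep d).keys = d.keys by
    rw [h, keys_comp0]
  intro t
  induction t with
  | nil => intro d; rfl
  | cons e t ih => intro d; rw [List.foldl_cons, ih, keys_mergeStep]

theorem contains_mergeRun (vertices : List Int) (t : List (Int × Int)) (x : Int) :
    (t.foldl mergeStep (comp0 vertices)).contains x = true ↔ x ∈ vertices := by
  rw [PySem.Dict.contains_iff_mem_keys, keys_mergeRun]
  exact PySem.Set.mem_ofList _ _

theorem getD_relabel (d : PySem.Dict Int Int) (cu cv : Int) (x : Int)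
    (hx : d.contains x = true) :
    (PySem.Dict.mk (d.items.map (fun kv => (kv.1, if kv.2 == cv then cu else kv.2)))).getD x 0
      = if d.getD x 0 = cv then cu else d.getD x 0 := by
  have hmk : PySem.Dict.mk d.items = d := rfl
  have h := get?_mapVal d.items (fun c => if c == cv then cu else c) x
  rw [hmk] at h
  cases hg : d.get? x with
  | none => rw [PySem.Dict.contains_eq_isSome_get?, hg] at hx; cases hx
  | some a =>
      rw [hg] at h
      rw [PySem.Dict.getD, h]
      simp [beq_iff_eq, PySem.Dict.getD, hg]

-- the label dict separates exactly the connected components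
theorem mergeRun_spec (vertices : List Int) (t : List (Int × Int))
    (hE : ∀ e ∈ t, e.1 ∈ vertices ∧ e.2 ∈ vertices) :
    ∀ x ∈ vertices, ∀ y ∈ vertices,
      ((t.foldl mergeStep (comp0 vertices)).getD x 0 =
        (t.foldl mergeStep (comp0 vertices)).getD y 0 ↔ Conn t x y) := by
  induction t using List.reverseRecOn with
  | nil =>
      intro x hx y hy
      simp only [List.foldl_nil]
      rw [getD_comp0 _ x hx, getD_comp0 _ y hy, conn_nil]
  | append_singleton t e ih =>
      have hEt : ∀ e' ∈ t, e'.1 ∈ vertices ∧ e'.2 ∈ vertices :=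
        fun e' he' => hE e' (List.mem_append.2 (Or.inl he'))
      have heV := hE e (List.mem_append.2 (Or.inr (List.mem_singleton.2 rfl)))
      have P1 := ih hEt
      intro x hx y hy
      simp only [List.foldl_append, List.foldl_cons, List.foldl_nil]
      set D := t.foldl mergeStep (comp0 vertices) with hD
      by_cases hcc : D.getD e.1 0 = D.getD e.2 0
      · have hstep : mergeStep D e = D := by
          simp [mergeStep, hcc]
        rw [hstep]
        have hConnE : Conn t e.1 e.2 := (P1 e.1 heV.1 e.2 heV.2).1 hcc
        rw [conn_append_iff]
        constructor
        · intro h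
          exact Or.inl ((P1 x hx y hy).1 h)
        · rintro (h | ⟨h1, h2⟩ | ⟨h1, h2⟩)
          · exact (P1 x hx y hy).2 h
          · exact (P1 x hx y hy).2 (conn_trans h1 (conn_trans hConnE h2))
          · exact (P1 x hx y hy).2 (conn_trans h1 (conn_trans (conn_symm hConnE) h2))
      · have hne' : (D.getD e.1 0 == D.getD e.2 0) = false := beq_eq_false_iff_ne.2 hcc
        have hstep : mergeStep D e =
            PySem.Dict.mk (D.items.map
              (fun kv => (kv.1, if kv.2 == D.getD e.2 0 then D.getD e.1 0 else kv.2))) := by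
          simp [mergeStep, hne']
        rw [hstep]
        have hcf : ∀ z ∈ vertices, (PySem.Dict.mk (D.items.map
            (fun kv => (kv.1, if kv.2 == D.getD e.2 0 then D.getD e.1 0 else kv.2)))).getD z 0
            = if D.getD z 0 = D.getD e.2 0 then D.getD e.1 0 else D.getD z 0 :=
          fun z hz => getD_relabel D _ _ z ((contains_mergeRun vertices t z).2 hz)
        rw [hcf x hx, hcf y hy, conn_append_iff]
        have hx1 : D.getD x 0 = D.getD e.1 0 ↔ Conn t x e.1 := P1 x hx e.1 heV.1
        have hx2 : D.getD x 0 = D.getD e.2 0 ↔ Conn t x e.2 := P1 x hx e.2 heV.2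
        have hy1 : D.getD y 0 = D.getD e.1 0 ↔ Conn t y e.1 := P1 y hy e.1 heV.1
        have hy2 : D.getD y 0 = D.getD e.2 0 ↔ Conn t y e.2 := P1 y hy e.2 heV.2
        have hxy : D.getD x 0 = D.getD y 0 ↔ Conn t x y := P1 x hx y hy
        by_cases h1 : D.getD x 0 = D.getD e.2 0 <;>
          by_cases h2 : D.getD y 0 = D.getD e.2 0
        · rw [if_pos h1, if_pos h2]
          constructor
          · intro _
            exact Or.inl (conn_trans (hx2.1 h1) (conn_symm (hy2.1 h2)))
          · intro _
            rfl
        · rw [if_pos h1, if_neg h2]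
          constructor
          · intro h
            exact Or.inr (Or.inr ⟨hx2.1 h1, conn_symm (hy1.1 h.symm)⟩)
          · rintro (h | ⟨ha, hb⟩ | ⟨ha, hb⟩)
            · exact absurd (hy2.2 (conn_trans (conn_symm h) (hx2.1 h1))) h2
            · exact absurd (hy2.2 (conn_symm hb)) h2
            · exact (hy1.2 (conn_symm hb)).symm
        · rw [if_neg h1, if_pos h2]
          constructor
          · intro h
            exact Or.inr (Or.inl ⟨hx1.1 h, conn_symm (hy2.1 h2)⟩)
          · rintro (h | ⟨ha, hb⟩ | ⟨ha, hb⟩)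
            · exact absurd (hx2.2 (conn_trans h (hy2.1 h2))) h1
            · exact hx1.2 ha
            · exact absurd (hx2.2 ha) h1
        · rw [if_neg h1, if_neg h2]
          constructor
          · intro h
            exact Or.inl (hxy.1 h)
          · rintro (h | ⟨ha, hb⟩ | ⟨ha, hb⟩)
            · exact hxy.2 h
            · exact absurd (hy2.2 (conn_symm hb)) h2
            · exact absurd (hx2.2 ha) h1

-- len(set(l)) as a Finset cardinality
theorem len_ofList_eq_card (l : List Int) :
    PySem.Set.len (PySem.Set.ofList l) = (l.toFinset.card : Int) := by
  have hnd := PySem.Set.nodup_ofList (α := Int) l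
  have hfin : (PySem.Set.ofList l).toFinset = l.toFinset := by
    ext x
    simp only [List.mem_toFinset]
    exact PySem.Set.mem_ofList l x
  unfold PySem.Set.len
  rw [← List.toFinset_card_of_nodup hnd, hfin]

-- acceptance of a subset by B, in terms of connectivity from the first vertex
theorem accB_iff (v0 : Int) (V' : List Int) (t : List (Int × Int))
    (hE : ∀ e ∈ t, e.1 ∈ (v0 :: V') ∧ e.2 ∈ (v0 :: V')) :
    ((PySem.Set.len (PySem.Set.ofList
        (t.foldl mergeStep (comp0 (v0 :: V'))).values) == (1 : Int)) = true) ↔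
      ∀ x ∈ (v0 :: V'), Conn t v0 x := by
  set D := t.foldl mergeStep (comp0 (v0 :: V')) with hD
  have hK : D.keys = PySem.Set.ofList (v0 :: V') := keys_mergeRun _ _
  have hndK : D.keys.Nodup := by
    rw [hK]; exact PySem.Set.nodup_ofList _
  have hmemK : ∀ x : Int, x ∈ D.keys ↔ x ∈ (v0 :: V') := by
    intro x
    rw [hK]
    exact PySem.Set.mem_ofList _ x
  have hvals : D.values = D.keys.map (fun k => D.getD k 0) :=
    PySem.Dict.values_eq_map_keys D hndK 0
  have P1 := mergeRun_spec (v0 :: V') t hE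
  rw [hvals, len_ofList_eq_card, beq_iff_eq]
  have hic : (((D.keys.map (fun k => D.getD k 0)).toFinset.card : Int) = 1) ↔
      (D.keys.map (fun k => D.getD k 0)).toFinset.card = 1 := by
    exact_mod_cast Iff.rfl
  rw [hic]
  constructor
  · intro h1 x hx
    obtain ⟨a, ha⟩ := Finset.card_eq_one.1 h1
    have hmm : ∀ z ∈ (v0 :: V'), D.getD z 0 = a := by
      intro z hz
      have hz' : D.getD z 0 ∈ (D.keys.map (fun k => D.getD k 0)).toFinset :=
        List.mem_toFinset.2 (List.mem_map.2 ⟨z, (hmemK z).2 hz, rfl⟩)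
      rw [ha] at hz'
      simpa using hz'
    exact conn_symm ((P1 x hx v0 List.mem_cons_self).1
      ((hmm x hx).trans (hmm v0 List.mem_cons_self).symm))
  · intro hc
    have hfin : (D.keys.map (fun k => D.getD k 0)).toFinset = {D.getD v0 0} := by
      ext c
      simp only [List.mem_toFinset, List.mem_map, Finset.mem_singleton]
      constructor
      · rintro ⟨k, hk, rfl⟩
        exact (P1 k ((hmemK k).1 hk) v0 List.mem_cons_self).2
          (conn_symm (hc k ((hmemK k).1 hk)))
      · rintro rfl
        exact ⟨v0, (hmemK v0).2 List.mem_cons_self, rfl⟩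
    rw [hfin]
    exact Finset.card_singleton _

-- ---- leaves ----

theorem mem_nbrFold (v x : Int) (t : List (Int × Int)) (s : PySem.Set Int) :
    x ∈ t.foldl
        (fun s e => if v == e.1 || v == e.2 then s.add (if v == e.1 then e.2 else e.1) else s)
        s ↔ x ∈ s ∨ edgeRel t v x := by
  induction t generalizing s with
  | nil => simp [edgeRel]
  | cons e t ih =>
      simp only [List.foldl_cons]
      rw [ih]
      have hrel : edgeRel (e :: t) v x ↔
          ((v = e.1 ∧ x = e.2) ∨ (x = e.1 ∧ v = e.2)) ∨ edgeRel t v x := by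
        simp only [edgeRel, List.mem_cons, Prod.ext_iff]
        tauto
      rw [hrel]
      by_cases h1 : v = e.1
      · have hg : (v == e.1 || v == e.2) = true := by simp [h1]
        have hsel : (if v == e.1 then e.2 else e.1) = e.2 := by simp [h1]
        rw [hg, if_pos rfl, hsel, PySem.Set.mem_add]
        constructor
        · rintro ((hx | rfl) | he)
          · exact Or.inl hx
          · exact Or.inr (Or.inl (Or.inl ⟨h1, rfl⟩))
          · exact Or.inr (Or.inr he)
        · rintro (hx | ((⟨_, rfl⟩ | ⟨rfl, h2⟩) | he))
          · exact Or.inl (Or.inl hx)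
          · exact Or.inl (Or.inr rfl)
          · exact Or.inl (Or.inr (by rw [← h1, h2]))
          · exact Or.inr he
      · by_cases h2 : v = e.2
        · have hg : (v == e.1 || v == e.2) = true := by simp [h2]
          have hsel : (if v == e.1 then e.2 else e.1) = e.1 := by
            simp [beq_eq_false_iff_ne.2 h1]
          rw [hg, if_pos rfl, hsel, PySem.Set.mem_add]
          constructor
          · rintro ((hx | rfl) | he)
            · exact Or.inl hx
            · exact Or.inr (Or.inl (Or.inr ⟨rfl, h2⟩))
            · exact Or.inr (Or.inr he)
          · rintro (hx | ((⟨h1', _⟩ | ⟨rfl, _⟩) | he))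
            · exact Or.inl (Or.inl hx)
            · exact absurd h1' h1
            · exact Or.inl (Or.inr rfl)
            · exact Or.inr he
        · have hg : (v == e.1 || v == e.2) = false := by
            simp [beq_eq_false_iff_ne.2 h1, beq_eq_false_iff_ne.2 h2]
          rw [hg]
          simp only [Bool.false_eq_true, if_false]
          constructor
          · rintro (hx | he)
            · exact Or.inl hx
            · exact Or.inr (Or.inr he)
          · rintro (hx | ((⟨h1', _⟩ | ⟨_, h2'⟩) | he))
            · exact Or.inl hx
            · exact absurd h1' h1
            · exact absurd h2' h2
            · exact Or.inr he

theorem mem_nbrSet (t : List (Int × Int)) (v x : Int) :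
    x ∈ nbrSet t v ↔ edgeRel t v x := by
  unfold nbrSet
  rw [mem_nbrFold]
  simp [PySem.Set.empty]

theorem nodup_nbrSet (t : List (Int × Int)) (v : Int) : (nbrSet t v).Nodup := by
  unfold nbrSet
  suffices h : ∀ (t : List (Int × Int)) (s : PySem.Set Int), s.Nodup →
      (t.foldl
        (fun s e => if v == e.1 || v == e.2 then s.add (if v == e.1 then e.2 else e.1) else s)
        s).Nodup by
    exact h t PySem.Set.empty List.nodup_nil
  intro t
  induction t with
  | nil => intro s hs; exact hs
  | cons e t ih =>
      intro s hs
      simp only [List.foldl_cons]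
      split
      · exact ih _ (PySem.Set.nodup_add _ _ hs)
      · exact ih _ hs

theorem nbrLen_eq (vertices : List Int) (t : List (Int × Int)) (v : Int) :
    PySem.Set.len ((buildAdj vertices t).getD v PySem.Set.empty) = PySem.Set.len (nbrSet t v) := by
  have h1 := nodup_getD_buildAdj vertices t v
  have h2 := nodup_nbrSet t v
  have hfin : ((buildAdj vertices t).getD v PySem.Set.empty).toFinset = (nbrSet t v).toFinset := by
    ext x
    simp only [List.mem_toFinset]
    rw [mem_getD_buildAdj, mem_nbrSet]
  unfold PySem.Set.len
  have hlen : ((buildAdj vertices t).getD v PySem.Set.empty).length = (nbrSet t v).length := by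
    rw [← List.toFinset_card_of_nodup h1, ← List.toFinset_card_of_nodup h2, hfin]
  exact_mod_cast hlen

-- ---- assembling ----

theorem body_eq (v0 : Int) (V' : List Int) (t : List (Int × Int))
    (hE : ∀ e ∈ t, e.1 ∈ (v0 :: V') ∧ e.2 ∈ (v0 :: V')) (st : Int × Option (List (Int × Int))) :
    (let tree_adj := buildAdj (v0 :: V') t
     if is_connected_set tree_adj (v0 :: V') then
       let leaves : Int :=
         ((v0 :: V').map (fun v =>
           if PySem.Set.len (tree_adj.getD v PySem.Set.empty) == (1 : Int) then (1 : Int) else 0)).sum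
       if leaves > st.1 then (leaves, some t) else st
     else st) =
    (let comp := t.foldl mergeStep (comp0 (v0 :: V'))
     if PySem.Set.len (PySem.Set.ofList comp.values) == (1 : Int) then
       let leaves : Int :=
         ((v0 :: V').map (fun v => if PySem.Set.len (nbrSet t v) == (1 : Int) then (1 : Int) else 0)).sum
       if leaves > st.1 then (leaves, some t) else st
     else st) := by
  have hacc : is_connected_set (buildAdj (v0 :: V') t) (v0 :: V') =
      (PySem.Set.len (PySem.Set.ofList
        (t.foldl mergeStep (comp0 (v0 :: V'))).values) == (1 : Int)) := by
    have h1 := accA_iff v0 V' t hE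
    have h2 := accB_iff v0 V' t hE
    cases hA : is_connected_set (buildAdj (v0 :: V') t) (v0 :: V') <;>
      cases hB : (PySem.Set.len (PySem.Set.ofList
        (t.foldl mergeStep (comp0 (v0 :: V'))).values) == (1 : Int))
    · rfl
    · rw [hA] at h1
      rw [hB] at h2
      exact absurd (h2.1 rfl) (fun hc => by simpa using h1.2 hc)
    · rw [hA] at h1
      rw [hB] at h2
      exact absurd (h1.1 rfl) (fun hc => by simpa using h2.2 hc)
    · rfl
  dsimp only
  rw [← hacc]
  cases hA : is_connected_set (buildAdj (v0 :: V') t) (v0 :: V') with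
  | false => rfl
  | true =>
      have hmapeq : (v0 :: V').map (fun v =>
            if PySem.Set.len ((buildAdj (v0 :: V') t).getD v PySem.Set.empty) == (1 : Int)
            then (1 : Int) else 0)
          = (v0 :: V').map (fun v => if PySem.Set.len (nbrSet t v) == (1 : Int) then (1 : Int) else 0) :=
        List.map_congr_left (fun x _ => by rw [nbrLen_eq (v0 :: V') t x])
      rw [hmapeq]

-- ===== VERDICT (by name: the statement is the Claim_ definition above) =====
theorem leaf_number_spec : Claim_equal_leaf_number := by
  intro vertices edges adj _ hpre
  obtain ⟨hne, hcond⟩ := hpre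
  unfold Spec_leaf_number leaf_number leaf_number_alt
  cases vertices with
  | nil => exact absurd rfl hne
  | cons v0 V' =>
      apply Eq.symm
      apply PySem.List.foldl_congr_mem
      intro st t ht
      obtain ⟨hsub, hlen⟩ := (PySem.List.mem_combinations_iff _ _ _).1 ht
      have hlen' : t.length = V'.length := by
        simp only [List.length_cons] at hlen
        omega
      have hEt : ∀ e ∈ t, e.1 ∈ (v0 :: V') ∧ e.2 ∈ (v0 :: V') := by
        rcases hcond with h1 | h1 | h1
        · have hV0 : V' = [] := by
            simp only [List.length_cons] at h1
            exact List.eq_nil_of_length_eq_zero (by omega)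
          have ht0 : t = [] := List.eq_nil_of_length_eq_zero (by rw [hlen', hV0]; rfl)
          subst ht0
          intro e he
          cases he
        · exfalso
          have := hsub.length_le
          simp only [List.length_cons] at h1
          omega
        · exact fun e he => h1 e (hsub.mem he)
      exact (body_eq v0 V' t hEt st).symm
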